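-- pv_equiv track=rewrite | github.com/portwebdesign/code-graph-rag | codebase_rag/parsers/languages/kotlin/kotlin_parser.py | _parse_superclass_and_interfaces
-- ===== SOURCE A (Python) =====
-- def _parse_superclass_and_interfaces(superclass_str: str) -> tuple:
--     """Parse superclass and interfaces from string."""
--     if not superclass_str:
--         return None, []
--
--     parts = [p.strip() for p in superclass_str.split(",")]
--
--     superclass = None
--     interfaces = []
--
--     for part in parts:
--         if not superclass and part and part[0].isupper():
--             superclass = part
--         elif part:
--             interfaces.append(part)
--
--     return superclass, interfaces
-- ===== SOURCE B (Python) =====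
-- def _parse_superclass_and_interfaces(superclass_str: str) -> tuple:
--     """Parse superclass and interfaces from string."""
--     if not superclass_str:
--         return None, []
--
--     def go(parts):
--         if not parts:
--             return None, []
--         head, rest = parts[0], parts[1:]
--         if head and head[0].isupper():
--             # superclass found: the whole tail collapses to one filter
--             return head, [p for p in rest if p]
--         sc, ifs = go(rest)
--         return sc, ([head] + ifs if head else ifs)
--
--     return go([p.strip() for p in superclass_str.split(",")])
-- ===== Notes on version B (the rewrite author's own statement) =====
-- stated objective: alternative
-- what changed: Replaced A's single stateful loop (mutable superclass slot plus growing interfaces list) by a recursive decomposition with early termination: recursion stops at the first uppercase-initial part and the whole remaining tail is handled by one filter, while the pre-superclass prefix is rebuilt by consing on the way out of the recursion.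
import Mathlib
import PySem

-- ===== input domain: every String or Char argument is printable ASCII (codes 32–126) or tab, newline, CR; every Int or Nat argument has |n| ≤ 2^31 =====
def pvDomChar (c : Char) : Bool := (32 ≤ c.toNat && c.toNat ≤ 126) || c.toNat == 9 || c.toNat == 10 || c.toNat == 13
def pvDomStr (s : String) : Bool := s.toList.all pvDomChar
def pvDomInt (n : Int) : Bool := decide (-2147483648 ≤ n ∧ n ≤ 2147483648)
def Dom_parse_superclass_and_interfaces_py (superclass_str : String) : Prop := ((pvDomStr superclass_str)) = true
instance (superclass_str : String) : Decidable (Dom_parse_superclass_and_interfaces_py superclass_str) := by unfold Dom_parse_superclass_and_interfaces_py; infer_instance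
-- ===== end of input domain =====

-- B replaces A's single stateful loop by a recursive decomposition with early
-- termination: recursion stops at the first uppercase-initial part, the remaining
-- tail collapses to one filter, and the prefix is rebuilt by consing (alternative).

-- shared by both ports: [p.strip() for p in superclass_str.split(",")]
def pvParts (s : String) : List String :=
  ((PySem.Str.split? s ",").getD []).map PySem.Str.strip   -- split? is `some` since "," ≠ ""

-- part[0].isupper() (only reached when `part` is non-empty in both Pythons)
def pvHeadUpper (p : String) : Bool :=
  match PySem.Str.pyGet? p 0 with
  | some c => PySem.Chars.isupper c
  | none => false

-- the body of A's for-loop, one step of the fold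
def pvStepA (st : Option String × List String) (part : String) : Option String × List String :=
  if st.1.isNone && part != "" && pvHeadUpper part then (some part, st.2)
  else if part != "" then (st.1, st.2 ++ [part])
  else st

-- ===== PORT A =====
def parse_superclass_and_interfaces_py (superclass_str : String) : Option String × List String :=
  if superclass_str = "" then (none, [])
  else
    (pvParts superclass_str).foldl pvStepA (none, [])

-- ===== PORT B =====
-- Source B's inner recursive `go`
def pvGo : List String → Option String × List String
  | [] => (none, [])
  | head :: rest =>
    if head != "" && pvHeadUpper head then (head, rest.filter (· != ""))
    else
      let r := pvGo rest
      (r.1, if head != "" then head :: r.2 else r.2)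

def parse_superclass_and_interfaces_py_alt (superclass_str : String) : Option String × List String :=
  if superclass_str = "" then (none, [])
  else pvGo (pvParts superclass_str)

-- ===== PRECONDITION & SPEC =====
def Spec_parse_superclass_and_interfaces_py (superclass_str : String) (out : Option String × List String) : Prop := out = parse_superclass_and_interfaces_py_alt superclass_str
instance (superclass_str : String) (out : Option String × List String) : Decidable (Spec_parse_superclass_and_interfaces_py superclass_str out) := by unfold Spec_parse_superclass_and_interfaces_py; infer_instance

-- ===== CLAIM (what is proved, stated in full; the proofs are below) =====
def Claim_equal_parse_superclass_and_interfaces_py : Prop := ∀ (superclass_str : String), Dom_parse_superclass_and_interfaces_py superclass_str → Spec_parse_superclass_and_interfaces_py superclass_str (parse_superclass_and_interfaces_py superclass_str)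

-- ===== LEMMAS AND PROOFS =====

-- A's fold once the superclass is captured: appends every non-empty part
theorem pv_fold_some (parts : List String) (sc : String) (acc : List String) :
    parts.foldl pvStepA (some sc, acc)
    = (some sc, acc ++ parts.filter (· != "")) := by
  induction parts generalizing acc with
  | nil => simp
  | cons p rest ih =>
    have hstep : pvStepA (some sc, acc) p = (some sc, if p = "" then acc else acc ++ [p]) := by
      by_cases hp : p = "" <;> simp [pvStepA, hp]
    rw [List.foldl_cons, hstep]
    by_cases hp : p = "" <;> simp [hp, ih]

-- A's fold before the superclass is found agrees with B's recursion
theorem pv_main (parts : List String) (acc : List String) :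
    parts.foldl pvStepA (none, acc) = ((pvGo parts).1, acc ++ (pvGo parts).2) := by
  induction parts generalizing acc with
  | nil => simp [pvGo]
  | cons p rest ih =>
    by_cases hq : (p != "" && pvHeadUpper p) = true
    · have hstep : pvStepA (none, acc) p = (some p, acc) := by simp [pvStepA, hq]
      rw [List.foldl_cons, hstep, pv_fold_some]
      simp [pvGo, hq]
    · by_cases hp : p = ""
      · have hstep : pvStepA (none, acc) p = (none, acc) := by simp [pvStepA, hp]
        rw [List.foldl_cons, hstep, ih]
        simp [pvGo, hp]
      · have hu : pvHeadUpper p = false := by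
          cases h : pvHeadUpper p
          · rfl
          · exact absurd (by simp [hp, h]) hq
        have hstep : pvStepA (none, acc) p = (none, acc ++ [p]) := by
          simp [pvStepA, hp, hu]
        rw [List.foldl_cons, hstep, ih]
        simp [pvGo, hp, hu]

-- ===== VERDICT (by name: the statement is the Claim_ definition above) =====
theorem parse_superclass_and_interfaces_py_spec : Claim_equal_parse_superclass_and_interfaces_py := by
  intro s _
  unfold Spec_parse_superclass_and_interfaces_py
  unfold parse_superclass_and_interfaces_py parse_superclass_and_interfaces_py_alt
  by_cases hs : s = ""
  · simp [hs]
  · simp only [if_neg hs]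
    exact pv_main (pvParts s) []
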